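-- pv_equiv track=rewrite | github.com/shangeet/GameAI | HW4/astarnavigator.py | generateSucessors
-- ===== SOURCE A (Python) =====
-- def generateSucessors(node, network):
-- 	sucs = []
-- 	for edge in network:
-- 		if node == edge[0]:
-- 			if edge[1] not in sucs:
-- 				sucs.append(edge[1])
-- 		elif node == edge[1]:
-- 			if edge[0] not in sucs:
-- 				sucs.append(edge[0])
-- 	return sucs
-- ===== SOURCE B (Python) =====
-- def generateSucessors(node, network):
--     def pick(edge):
--         if node == edge[0]:
--             return edge[1]
--         if node == edge[1]:
--             return edge[0]
--         return None
--
--     def go(edges):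
--         if not edges:
--             return []
--         v = pick(edges[0])
--         rest = edges[1:]
--         if v is None:
--             return go(rest)
--         return [v] + go([e for e in rest if pick(e) != v])
--
--     return go(network)
-- ===== Notes on version B (the rewrite author's own statement) =====
-- stated objective: alternative
-- what changed: B replaces A's accumulator loop with membership checks by a recursive decomposition: emit the first edge's neighbor, filter every later edge contributing that same neighbor out of the remaining list, and recurse on what is left.
import Mathlib
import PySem

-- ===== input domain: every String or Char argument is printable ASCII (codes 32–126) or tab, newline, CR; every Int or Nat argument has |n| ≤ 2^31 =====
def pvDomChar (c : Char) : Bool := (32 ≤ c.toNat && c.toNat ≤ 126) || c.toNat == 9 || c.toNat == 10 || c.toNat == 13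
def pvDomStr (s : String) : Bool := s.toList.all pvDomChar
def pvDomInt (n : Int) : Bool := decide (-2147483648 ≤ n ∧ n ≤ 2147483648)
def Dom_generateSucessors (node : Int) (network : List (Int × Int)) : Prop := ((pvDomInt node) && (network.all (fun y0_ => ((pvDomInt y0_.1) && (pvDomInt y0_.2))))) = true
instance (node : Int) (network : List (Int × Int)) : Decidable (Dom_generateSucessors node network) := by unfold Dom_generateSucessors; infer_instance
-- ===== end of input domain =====

-- B finds neighbors by structural recursion that emits each new neighbor and then
-- filters all later edges contributing it out of the remaining list, instead of A's
-- single accumulator loop with membership checks; objective: alternative decomposition.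


-- ===== PORT A =====
def generateSucessors (node : Int) (network : List (Int × Int)) : List Int :=
  network.foldl
    (fun sucs edge =>
      if node == edge.1 then
        (if sucs.contains edge.2 then sucs else sucs ++ [edge.2])
      else if node == edge.2 then
        (if sucs.contains edge.1 then sucs else sucs ++ [edge.1])
      else sucs)
    []

-- ===== PORT B =====
-- the element (if any) an edge contributes (B's helper `pick`)
def pvPick (node : Int) (edge : Int × Int) : Option Int :=
  if node == edge.1 then some edge.2
  else if node == edge.2 then some edge.1
  else none

-- B's helper `go`: emit the first edge's neighbor (if any), drop every later edge
-- contributing the same neighbor, recurse on what remains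
def pvGo (node : Int) : List (Int × Int) → List Int
  | [] => []
  | e :: rest =>
    match pvPick node e with
    | none => pvGo node rest
    | some v => v :: pvGo node (rest.filter (fun e' => !(pvPick node e' == some v)))
termination_by edges => edges.length
decreasing_by
  · simp
  · simpa using Nat.lt_succ_of_le (le_trans (List.length_filter_le _ _) (by simp))

def generateSucessors_alt (node : Int) (network : List (Int × Int)) : List Int :=
  pvGo node network

-- ===== PRECONDITION & SPEC =====
def Spec_generateSucessors (node : Int) (network : List (Int × Int)) (out : List Int) : Prop := out = generateSucessors_alt node network
instance (node : Int) (network : List (Int × Int)) (out : List Int) : Decidable (Spec_generateSucessors node network out) := by unfold Spec_generateSucessors; infer_instance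

-- ===== CLAIM =====
def Claim_equal_generateSucessors : Prop := ∀ (node : Int) (network : List (Int × Int)), Dom_generateSucessors node network → Spec_generateSucessors node network (generateSucessors node network)

-- ===== LEMMAS AND PROOFS =====

-- first-occurrence dedup by filtering ahead (proof-side spec both programs meet)
def pvDedupF : List Int → List Int
  | [] => []
  | x :: l => x :: pvDedupF (l.filter (fun y => !(y == x)))
termination_by l => l.length
decreasing_by simpa using Nat.lt_succ_of_le (le_trans (List.length_filter_le _ _) (by simp))

theorem pvDedupF_nil : pvDedupF [] = [] := by rw [pvDedupF]

theorem pvDedupF_cons (x : Int) (l : List Int) :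
    pvDedupF (x :: l) = x :: pvDedupF (l.filter (fun y => !(y == x))) := by
  rw [pvDedupF]

theorem pvGo_nil (node : Int) : pvGo node [] = [] := by rw [pvGo]

theorem pvGo_cons (node : Int) (e : Int × Int) (rest : List (Int × Int)) :
    pvGo node (e :: rest) =
      match pvPick node e with
      | none => pvGo node rest
      | some v => v :: pvGo node (rest.filter (fun e' => !(pvPick node e' == some v))) := by
  rw [pvGo]

-- A's fused loop is Set.add folded over the picked elements
theorem fused_eq_fold_add (node : Int) (network : List (Int × Int)) (s : List Int) :
    network.foldl
      (fun sucs edge =>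
        if node == edge.1 then
          (if sucs.contains edge.2 then sucs else sucs ++ [edge.2])
        else if node == edge.2 then
          (if sucs.contains edge.1 then sucs else sucs ++ [edge.1])
        else sucs)
      s = (network.filterMap (pvPick node)).foldl PySem.Set.add s := by
  induction network generalizing s with
  | nil => simp
  | cons e t ih =>
      simp only [List.foldl_cons, List.filterMap_cons, pvPick]
      by_cases h1 : (node == e.1) = true
      · rw [if_pos h1, if_pos h1, ih]
        simp only [List.foldl_cons, PySem.Set.add]; rfl
      · rw [if_neg h1, if_neg h1]
        by_cases h2 : (node == e.2) = true
        · rw [if_pos h2, if_pos h2, ih]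
          simp only [List.foldl_cons, PySem.Set.add]; rfl
        · rw [if_neg h2, if_neg h2, ih]; rfl

-- folding Set.add from accumulator s appends the filter-ahead dedup of the unseen elements
theorem fold_add_eq_dedupF (l : List Int) (s : List Int) :
    l.foldl PySem.Set.add s = s ++ pvDedupF (l.filter (fun y => !(s.contains y))) := by
  induction l generalizing s with
  | nil => simp [pvDedupF_nil]
  | cons x l ih =>
      simp only [List.foldl_cons, List.filter_cons, PySem.Set.add, PySem.Set.contains]
      by_cases hc : s.contains x = true
      · rw [if_pos hc]
        have hx : x ∈ s := by simpa using hc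
        simp [hx, ih]
      · rw [if_neg hc]
        rw [ih]
        simp only [hc, Bool.not_false, if_pos, pvDedupF_cons, List.append_assoc,
          List.singleton_append]
        congr 2
        rw [List.filter_filter]
        congr 1
        apply List.filter_congr
        intro a _
        by_cases hax : a = x
        · subst hax; simp
        · simp [hax]

-- filtering edges by "does not pick v" then picking = picking then filtering out v
theorem filterMap_pick_filter (node v : Int) (l : List (Int × Int)) :
    (l.filter (fun e' => !(pvPick node e' == some v))).filterMap (pvPick node)
      = (l.filterMap (pvPick node)).filter (fun y => !(y == v)) := by
  induction l with
  | nil => simp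
  | cons e t ih =>
      simp only [List.filter_cons, List.filterMap_cons]
      cases h : pvPick node e with
      | none => simpa [h] using ih
      | some w =>
          by_cases hw : w = v
          · subst hw; simpa [h] using ih
          · simpa [h, hw] using ih

-- B's recursion computes the filter-ahead dedup of the picked elements
theorem go_eq_dedupF (node : Int) (edges : List (Int × Int)) :
    pvGo node edges = pvDedupF (edges.filterMap (pvPick node)) := by
  have key : ∀ (n : Nat) (es : List (Int × Int)), es.length ≤ n →
      pvGo node es = pvDedupF (es.filterMap (pvPick node)) := by
    intro n
    induction n with
    | zero =>
        intro es h
        have : es = [] := List.eq_nil_of_length_eq_zero (Nat.le_zero.mp h)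
        subst this
        simp [pvGo_nil, pvDedupF_nil]
    | succ n ih =>
        intro es h
        cases es with
        | nil => simp [pvGo_nil, pvDedupF_nil]
        | cons e rest =>
            rw [pvGo_cons]
            cases hp : pvPick node e with
            | none =>
                simp only [List.filterMap_cons, hp]
                exact ih rest (Nat.le_of_succ_le_succ (by simpa using h))
            | some v =>
                simp only [List.filterMap_cons, hp, pvDedupF_cons]
                rw [ih _ (le_trans (List.length_filter_le _ _)
                      (Nat.le_of_succ_le_succ (by simpa using h)))]
                rw [filterMap_pick_filter]
  exact key edges.length edges le_rfl

-- ===== VERDICT =====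
theorem generateSucessors_spec : Claim_equal_generateSucessors := by
  intro node network _
  show generateSucessors node network = generateSucessors_alt node network
  unfold generateSucessors generateSucessors_alt
  rw [fused_eq_fold_add, go_eq_dedupF, fold_add_eq_dedupF]
  simp
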